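-- pv_equiv track=rewrite | github.com/Evintkoo/circrna_classification | kmer_counting.py | make_rna_combination_list
-- ===== SOURCE A (Python) =====
-- from typing import List
--
-- NUCLEOTIDES_LIST = ["A", "G", "C", "U"]
--
-- def make_rna_combination_list(strand_length_target:int, cur_strand:str="", strand_cumulator:List[str]=[]) -> list:
--     """Create list of combination of all possible RNA in the string
--
--     Args:
--         strand_length_target (int): _description_
--         cur_strand (str, optional): _description_. Defaults to "".
--         strand_cumulator (list, optional): _description_. Defaults to [].
--
--     Returns:
--         list: _description_
--     """
--     if cur_strand == "":
--         strand_cumulator = []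
--     if len(cur_strand) == strand_length_target and cur_strand not in strand_cumulator:
--         strand_cumulator.append(cur_strand)
--     elif len(cur_strand) < strand_length_target:
--         for nucleotides in NUCLEOTIDES_LIST:
--             make_rna_combination_list(strand_length_target=strand_length_target,
--                                       cur_strand=cur_strand + nucleotides,
--                                       strand_cumulator=strand_cumulator)
--     return strand_cumulator
-- ===== SOURCE B (Python) =====
-- from typing import List
--
-- NUCLEOTIDES_LIST = ["A", "G", "C", "U"]
--
-- def make_rna_combination_list(strand_length_target:int, cur_strand:str="", strand_cumulator:List[str]=[]) -> list:
--     """Breadth-first version: grow a pool of partial strands level by level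
--     instead of recursing, then append the finished strands (minus the ones
--     already present) to the accumulator. Return value only; does not mutate
--     strand_cumulator."""
--     acc = [] if cur_strand == "" else list(strand_cumulator)
--     if strand_length_target < len(cur_strand):
--         return acc
--     pool = [cur_strand]
--     for _ in range(strand_length_target - len(cur_strand)):
--         pool = [s + nuc for s in pool for nuc in NUCLEOTIDES_LIST]
--     return acc + [s for s in pool if s not in acc]
-- ===== Notes on version B (the rewrite author's own statement) =====
-- stated objective: alternative
-- what changed: Replaced A's deduplicating depth-first recursion (membership test against the growing accumulator at every leaf) by an iterative breadth-first pool build followed by a single filter against the initial accumulator; B also does not mutate strand_cumulator.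
import Mathlib
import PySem

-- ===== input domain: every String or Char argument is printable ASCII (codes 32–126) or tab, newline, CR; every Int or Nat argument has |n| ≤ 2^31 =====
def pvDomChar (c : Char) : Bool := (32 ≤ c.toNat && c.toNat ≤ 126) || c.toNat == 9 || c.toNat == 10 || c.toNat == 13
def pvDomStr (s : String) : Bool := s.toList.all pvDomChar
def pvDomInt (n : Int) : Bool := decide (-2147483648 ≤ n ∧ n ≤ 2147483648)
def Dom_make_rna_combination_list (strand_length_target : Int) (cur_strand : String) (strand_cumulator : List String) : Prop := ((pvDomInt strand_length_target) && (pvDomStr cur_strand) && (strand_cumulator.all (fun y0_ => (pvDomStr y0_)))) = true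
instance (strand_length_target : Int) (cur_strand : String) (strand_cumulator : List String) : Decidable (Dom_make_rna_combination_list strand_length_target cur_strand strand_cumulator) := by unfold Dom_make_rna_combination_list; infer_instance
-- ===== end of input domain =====

-- B replaces A's deduplicating depth-first recursion by an iterative level-by-level pool build
-- with a single filter against the initial accumulator (return-value equivalence only: A mutates
-- strand_cumulator in place when cur_strand is nonempty, B does not).

-- ===== PORT A =====
def NUCLEOTIDES_LIST : List String := ["A", "G", "C", "U"]

def make_rna_combination_list (strand_length_target : Int) (cur_strand : String) (strand_cumulator : List String) : List String :=
  let acc := if cur_strand = "" then ([] : List String) else strand_cumulator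
  if PySem.Str.len cur_strand = strand_length_target then
    (if cur_strand ∈ acc then acc else acc ++ [cur_strand])
  else if PySem.Str.len cur_strand < strand_length_target then
    -- 'for nucleotides in NUCLEOTIDES_LIST: recurse' ; .attach only carries the membership proof for termination
    NUCLEOTIDES_LIST.attach.foldl
      (fun a nuc => make_rna_combination_list strand_length_target (cur_strand ++ nuc.1) a) acc
  else acc
termination_by (strand_length_target - PySem.Str.len cur_strand).toNat
decreasing_by
  have hm := nuc.2
  simp only [NUCLEOTIDES_LIST, List.mem_cons, List.not_mem_nil, or_false] at hm
  have hl : PySem.Str.len (cur_strand ++ nuc.1) = PySem.Str.len cur_strand + 1 := by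
    rcases hm with h | h | h | h <;> rw [h, PySem.Str.len_append] <;>
      norm_num [show PySem.Str.len "A" = 1 from by decide, show PySem.Str.len "G" = 1 from by decide,
        show PySem.Str.len "C" = 1 from by decide, show PySem.Str.len "U" = 1 from by decide] <;>
      decide
  rw [hl]; omega

-- ===== PORT B =====
def make_rna_combination_list_alt (strand_length_target : Int) (cur_strand : String) (strand_cumulator : List String) : List String :=
  let acc := if cur_strand = "" then ([] : List String) else strand_cumulator
  if strand_length_target < PySem.Str.len cur_strand then acc
  else
    let pool := (List.range (strand_length_target - PySem.Str.len cur_strand).toNat).foldl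
      (fun p _ => p.flatMap (fun s => NUCLEOTIDES_LIST.map (fun nuc => s ++ nuc))) [cur_strand]
    acc ++ pool.filter (fun s => s ∉ acc)

-- ===== PRECONDITION & SPEC =====
-- Pre_ excludes calls whose recursion depth (strand_length_target - len(cur_strand)) exceeds
-- CPython's recursion limit, on which A raises RecursionError (the margin below the ~1000 limit
-- only drops depths on which A could never return anyway: it would have to build 4^depth strands).
def Pre_make_rna_combination_list (strand_length_target : Int) (cur_strand : String) (strand_cumulator : List String) : Prop := strand_length_target - PySem.Str.len cur_strand ≤ 900
instance (strand_length_target : Int) (cur_strand : String) (strand_cumulator : List String) : Decidable (Pre_make_rna_combination_list strand_length_target cur_strand strand_cumulator) := by unfold Pre_make_rna_combination_list; infer_instance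
def pvWitness_make_rna_combination_list : Int × String × List String := (2, "", ["AA"])

def Spec_make_rna_combination_list (strand_length_target : Int) (cur_strand : String) (strand_cumulator : List String) (out : List String) : Prop := out = make_rna_combination_list_alt strand_length_target cur_strand strand_cumulator
instance (strand_length_target : Int) (cur_strand : String) (strand_cumulator : List String) (out : List String) : Decidable (Spec_make_rna_combination_list strand_length_target cur_strand strand_cumulator out) := by unfold Spec_make_rna_combination_list; infer_instance

-- ===== CLAIM (what is proved, stated in full; the proofs are below) =====
def Claim_equal_make_rna_combination_list : Prop := ∀ (strand_length_target : Int) (cur_strand : String) (strand_cumulator : List String), Dom_make_rna_combination_list strand_length_target cur_strand strand_cumulator → Pre_make_rna_combination_list strand_length_target cur_strand strand_cumulator → Spec_make_rna_combination_list strand_length_target cur_strand strand_cumulator (make_rna_combination_list strand_length_target cur_strand strand_cumulator)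

-- ===== LEMMAS AND PROOFS =====

-- A's dedup-append step on the accumulator
def pvStep (acc : List String) (s : String) : List String := if s ∈ acc then acc else acc ++ [s]

-- all extensions of s by k nucleotides, in A's depth-first order
def pvExt : Nat → String → List String
  | 0, s => [s]
  | k+1, s => (NUCLEOTIDES_LIST.map (fun nuc => s ++ nuc)).flatMap (pvExt k)

-- all k-nucleotide words, in the same order
def pvWords : Nat → List String
  | 0 => [""]
  | k+1 => NUCLEOTIDES_LIST.flatMap (fun nuc => (pvWords k).map (nuc ++ ·))

lemma pvExt_eq_map_words : ∀ (k : Nat) (s : String), pvExt k s = (pvWords k).map (s ++ ·) := by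
  intro k
  induction k with
  | zero => intro s; simp [pvExt, pvWords]
  | succ k ih =>
    intro s
    simp [pvExt, pvWords, List.flatMap_map, List.map_flatMap, List.map_map, Function.comp_def, ih,
      String.append_assoc]

lemma pvHead_of_mem_block (k : Nat) (nuc : String) (c : Char) (h : nuc.toList = [c]) :
    ∀ x ∈ (pvWords k).map (nuc ++ ·), x.toList.head? = some c := by
  intro x hx
  simp only [List.mem_map] at hx
  obtain ⟨w, _, rfl⟩ := hx
  rw [String.toList_append, h]
  rfl

lemma pvBlocks_disjoint (k : Nat) (n1 n2 : String) (c1 c2 : Char)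
    (h1 : n1.toList = [c1]) (h2 : n2.toList = [c2]) (hne : c1 ≠ c2) :
    ((pvWords k).map (n1 ++ ·)).Disjoint ((pvWords k).map (n2 ++ ·)) := by
  intro x hx1 hx2
  have e1 := pvHead_of_mem_block k n1 c1 h1 x hx1
  have e2 := pvHead_of_mem_block k n2 c2 h2 x hx2
  rw [e1] at e2
  exact hne (Option.some.inj e2)

lemma pvBlocks_ne (k : Nat) (n1 n2 : String) (c1 c2 : Char)
    (h1 : n1.toList = [c1]) (h2 : n2.toList = [c2]) (hne : c1 ≠ c2) :
    ∀ a ∈ (pvWords k).map (n1 ++ ·), ∀ b ∈ (pvWords k).map (n2 ++ ·), a ≠ b :=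
  fun _ ha _ hb h => pvBlocks_disjoint k n1 n2 c1 c2 h1 h2 hne ha (h ▸ hb)

lemma pvBlock_nodup (k : Nat) (nuc : String) (h : (pvWords k).Nodup) :
    ((pvWords k).map (nuc ++ ·)).Nodup :=
  h.map (fun _ _ hab => (String.append_right_inj nuc).mp hab)

lemma pvWords_nodup : ∀ (k : Nat), (pvWords k).Nodup := by
  intro k
  induction k with
  | zero => simp [pvWords]
  | succ k ih =>
    have hA := pvBlock_nodup k "A" ih
    have hG := pvBlock_nodup k "G" ih
    have hC := pvBlock_nodup k "C" ih
    have hU := pvBlock_nodup k "U" ih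
    simp only [pvWords, NUCLEOTIDES_LIST, List.flatMap_cons, List.flatMap_nil, List.append_nil]
    rw [List.nodup_append, List.nodup_append, List.nodup_append]
    refine ⟨hA, ⟨hG, ⟨hC, hU, ?_⟩, ?_⟩, ?_⟩
    · exact pvBlocks_ne k "C" "U" 'C' 'U' rfl rfl (by decide)
    · intro a ha b hb
      rcases List.mem_append.mp hb with hb | hb
      · exact pvBlocks_ne k "G" "C" 'G' 'C' rfl rfl (by decide) a ha b hb
      · exact pvBlocks_ne k "G" "U" 'G' 'U' rfl rfl (by decide) a ha b hb
    · intro a ha b hb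
      rcases List.mem_append.mp hb with hb | hb
      · exact pvBlocks_ne k "A" "G" 'A' 'G' rfl rfl (by decide) a ha b hb
      rcases List.mem_append.mp hb with hb | hb
      · exact pvBlocks_ne k "A" "C" 'A' 'C' rfl rfl (by decide) a ha b hb
      · exact pvBlocks_ne k "A" "U" 'A' 'U' rfl rfl (by decide) a ha b hb

lemma pvExt_nodup (k : Nat) (s : String) : (pvExt k s).Nodup := by
  rw [pvExt_eq_map_words]
  exact pvBlock_nodup k s (pvWords_nodup k)

-- A's append-with-membership-check fold over a duplicate-free list is a plain filter
lemma pvFoldl_step : ∀ (l acc : List String), l.Nodup →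
    l.foldl pvStep acc = acc ++ l.filter (fun s => s ∉ acc) := by
  intro l
  induction l with
  | nil => intro acc _; simp
  | cons a tl ih =>
    intro acc hnd
    have ha : a ∉ tl := (List.nodup_cons.mp hnd).1
    have htl : tl.Nodup := (List.nodup_cons.mp hnd).2
    by_cases hmem : a ∈ acc
    · simp only [List.foldl_cons, pvStep, List.filter_cons, hmem]
      simp [ih acc htl]
    · simp only [List.foldl_cons, pvStep, if_neg hmem, List.filter_cons]
      rw [ih (acc ++ [a]) htl]
      have hf : tl.filter (fun s => decide (s ∉ acc ++ [a])) = tl.filter (fun s => decide (s ∉ acc)) := by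
        apply List.filter_congr
        intro x hx
        have : x ≠ a := fun h => ha (h ▸ hx)
        simp [List.mem_append, this]
      rw [hf]
      simp [hmem, List.append_assoc]

lemma pvAppend_nuc_ne_empty (cur nuc : String) (c : Char) (h : nuc.toList = [c]) :
    cur ++ nuc ≠ "" := by
  intro he
  have := congrArg String.toList he
  rw [String.toList_append, h] at this
  simp at this

-- A's recursion computes the dedup fold over the depth-first extension list
lemma pvA_char : ∀ (k : Nat) (t : Int) (cur : String) (acc : List String),
    PySem.Str.len cur + k = t →
    make_rna_combination_list t cur acc =
      (pvExt k cur).foldl pvStep (if cur = "" then [] else acc) := by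
  intro k
  induction k with
  | zero =>
    intro t cur acc hk
    rw [make_rna_combination_list]
    simp only [pvExt, List.foldl_cons, List.foldl_nil, pvStep]
    rw [if_pos (by omega)]
  | succ k ih =>
    intro t cur acc hk
    rw [make_rna_combination_list]
    rw [if_neg (by omega), if_pos (by omega)]
    have hlen : ∀ (nuc : String) (c : Char), nuc.toList = [c] →
        PySem.Str.len (cur ++ nuc) + k = t := by
      intro nuc c h
      rw [PySem.Str.len_append, PySem.Str.len_eq nuc, h]
      simp only [List.length_cons, List.length_nil, Nat.cast_one, Nat.zero_add]
      omega
    have hstep : ∀ (nuc : String) (c : Char) (a : List String), nuc.toList = [c] →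
        make_rna_combination_list t (cur ++ nuc) a = (pvExt k (cur ++ nuc)).foldl pvStep a := by
      intro nuc c a h
      rw [ih t (cur ++ nuc) a (hlen nuc c h), if_neg (pvAppend_nuc_ne_empty cur nuc c h)]
    rw [List.foldl_attach (f := fun a s => make_rna_combination_list t (cur ++ s) a)]
    simp only [NUCLEOTIDES_LIST, List.foldl_cons, List.foldl_nil]
    rw [hstep "A" 'A' _ rfl, hstep "G" 'G' _ rfl, hstep "C" 'C' _ rfl, hstep "U" 'U' _ rfl]
    simp only [pvExt, NUCLEOTIDES_LIST, List.map_cons, List.map_nil, List.flatMap_cons,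
      List.flatMap_nil, List.append_nil, List.foldl_append]

-- B's iterated pool expansion is the depth-first extension list
lemma pvB_pool : ∀ (m : Nat) (pool : List String),
    (List.range m).foldl
      (fun p _ => p.flatMap (fun s => NUCLEOTIDES_LIST.map (fun nuc => s ++ nuc))) pool
      = pool.flatMap (pvExt m) := by
  intro m
  induction m with
  | zero => intro pool; simp [pvExt]
  | succ m ih =>
    intro pool
    rw [List.range_succ_eq_map, List.foldl_cons, List.foldl_map, ih]
    rw [List.flatMap_assoc]
    rfl

-- ===== VERDICT (by name: the statement is the Claim_ definition above) =====
theorem make_rna_combination_list_spec : Claim_equal_make_rna_combination_list := by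
  unfold Claim_equal_make_rna_combination_list Spec_make_rna_combination_list
  intro t cur acc _ _
  rw [make_rna_combination_list_alt]
  have hcur : (0 : Int) ≤ PySem.Str.len cur := by rw [PySem.Str.len_eq]; positivity
  by_cases hlt : t < PySem.Str.len cur
  · -- target shorter than the current strand: both return the (possibly reset) accumulator
    rw [make_rna_combination_list]
    rw [if_neg (by omega : ¬ PySem.Str.len cur = t), if_neg (by omega : ¬ PySem.Str.len cur < t)]
    rw [if_pos hlt]
  · simp only [if_neg hlt]
    set k := (t - PySem.Str.len cur).toNat with hkdef
    have hk : PySem.Str.len cur + k = t := by omega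
    rw [pvA_char k t cur acc hk, pvB_pool k [cur]]
    simp only [List.flatMap_cons, List.flatMap_nil, List.append_nil]
    exact pvFoldl_step (pvExt k cur) _ (pvExt_nodup k cur)
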